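-- pv_equiv track=rewrite | github.com/MoutonBinoclard/Super-Python-Calculator | SPC_subcode/data_extraction_from_single_round.py | adjust_placement
-- ===== SOURCE A (Python) =====
-- def adjust_placement(dict_round):
--     """
--     Adjusts placement so it reflect the position in the round.
--     Only really useful for the team mode.
--     """
--     list_placement = [] # List with all the current placements possible
--     for id in dict_round:
--         if dict_round[id][0] not in list_placement and dict_round[id][0] > 0:
--             list_placement.append(dict_round[id][0])
--
--     # Sort the placements
--     list_placement.sort()
--
--     # Replace the placement (>0) in the dictionnary by the index+1 in the list
--     for id in dict_round:
--         if dict_round[id][0] > 0: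
--             dict_round[id][0] = list_placement.index(dict_round[id][0]) + 1
--
--     return dict_round
-- ===== SOURCE B (Python) =====
-- def adjust_placement(dict_round):
--     """
--     Adjusts placement so it reflects the position in the round.
--     Counting characterization instead of sort-and-index: the dense rank of a
--     positive placement p is the number of distinct positive placements <= p.
--     No sorting and no rank table; mutates dict_round in place, like A.
--     """
--     vals = [v[0] for v in dict_round.values()]
--     for v in dict_round.values():
--         p = v[0]
--         if p > 0:
--             v[0] = len({q for q in vals if 0 < q <= p})
--     return dict_round
-- ===== Notes on version B (the rewrite author's own statement) =====
-- stated objective: alternative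
-- what changed: B drops A's build-distinct-list/sort/list.index machinery entirely and computes each dense rank directly as the count of distinct positive placements <= p (order statistics by counting, no sort).
-- outside the precondition, e.g. on adjust_placement({'a': []}): A raises IndexError, B raises IndexError
import Mathlib
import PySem

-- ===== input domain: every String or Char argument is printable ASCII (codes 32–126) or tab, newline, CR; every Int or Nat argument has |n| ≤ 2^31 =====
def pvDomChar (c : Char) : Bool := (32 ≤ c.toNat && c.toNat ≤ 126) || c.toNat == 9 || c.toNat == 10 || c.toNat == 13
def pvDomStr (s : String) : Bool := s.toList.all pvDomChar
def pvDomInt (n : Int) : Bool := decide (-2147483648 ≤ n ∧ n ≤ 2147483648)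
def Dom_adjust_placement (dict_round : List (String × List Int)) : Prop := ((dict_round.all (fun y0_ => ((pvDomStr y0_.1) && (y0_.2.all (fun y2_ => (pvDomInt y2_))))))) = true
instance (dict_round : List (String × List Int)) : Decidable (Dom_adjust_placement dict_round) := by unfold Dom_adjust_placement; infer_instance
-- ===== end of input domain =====

-- B computes each dense rank directly as the count of distinct positive placements <= p
-- (no sort, no list.index); both Pythons mutate the dict's value lists in place,
-- the equivalence proved here is about the returned value.


-- ===== PORT A =====
def adjust_placement (dict_round : List (String × List Int)) : List (String × List Int) :=
  -- first loop: collect distinct positive first placements, in first-seen order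
  let list_placement : List Int := dict_round.foldl (fun acc kv =>
    let p := PySem.List.pyGetD kv.2 0 0   -- dict_round[id][0]; Pre_ guarantees kv.2 ≠ [] (else Python raises IndexError)
    if p ∉ acc ∧ 0 < p then acc ++ [p] else acc) []
  -- list_placement.sort()
  let lp := PySem.List.sorted list_placement (fun x => x) false
  -- second loop: dict_round[id][0] = list_placement.index(dict_round[id][0]) + 1
  dict_round.map (fun kv =>
    let p := PySem.List.pyGetD kv.2 0 0
    if 0 < p then
      (kv.1, PySem.List.pySetD kv.2 0 ((((PySem.List.index? lp p).getD 0 : Nat) : Int) + 1))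
    else kv)

-- ===== PORT B =====
def adjust_placement_alt (dict_round : List (String × List Int)) : List (String × List Int) :=
  -- vals = [v[0] for v in dict_round.values()]
  let vals : List Int := dict_round.map (fun kv => PySem.List.pyGetD kv.2 0 0)
  -- for v: if v[0] > 0: v[0] = len({q for q in vals if 0 < q <= p})
  dict_round.map (fun kv =>
    let p := PySem.List.pyGetD kv.2 0 0
    if 0 < p then
      (kv.1, PySem.List.pySetD kv.2 0
        (((PySem.Set.ofList (vals.filter (fun q => decide (0 < q ∧ q ≤ p)))).length : Int)))
    else kv)

-- ===== PRECONDITION & SPEC =====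
-- Pre_ excludes inputs where some value list is empty (Python A raises IndexError on dict_round[id][0])
-- and association lists with duplicate keys (not representable as a Python dict, A's and B's argument type).
def Pre_adjust_placement (dict_round : List (String × List Int)) : Prop :=
  (dict_round.map (fun kv => kv.1.toList)).Nodup ∧ ∀ kv ∈ dict_round, kv.2 ≠ []
instance (dict_round : List (String × List Int)) : Decidable (Pre_adjust_placement dict_round) := by
  unfold Pre_adjust_placement; infer_instance

def pvWitness_adjust_placement : (List (String × List Int)) :=
  [("a", [2]), ("b", [5, 1]), ("c", [0]), ("d", [2])]

def Spec_adjust_placement (dict_round : List (String × List Int)) (out : List (String × List Int)) : Prop := out = adjust_placement_alt dict_round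
instance (dict_round : List (String × List Int)) (out : List (String × List Int)) : Decidable (Spec_adjust_placement dict_round out) := by unfold Spec_adjust_placement; infer_instance

-- ===== CLAIM (what is proved, stated in full; the proofs are below) =====
def Claim_equal_adjust_placement : Prop := ∀ (dict_round : List (String × List Int)), Dom_adjust_placement dict_round → Pre_adjust_placement dict_round → Spec_adjust_placement dict_round (adjust_placement dict_round)

-- ===== LEMMAS AND PROOFS =====

-- the A-side collecting fold: membership
theorem pv_foldA_mem (xs : List Int) (acc : List Int) (x : Int) :
    x ∈ xs.foldl (fun a p => if p ∉ a ∧ 0 < p then a ++ [p] else a) acc ↔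
      x ∈ acc ∨ (x ∈ xs ∧ 0 < x) := by
  induction xs generalizing acc with
  | nil => simp
  | cons y ys ih =>
    simp only [List.foldl_cons, ih, List.mem_cons]
    by_cases hy : y ∉ acc ∧ 0 < y
    · rw [if_pos hy]
      simp only [List.mem_append, List.mem_cons, List.not_mem_nil, or_false]
      constructor
      · rintro ((h | rfl) | ⟨h, hx⟩)
        · exact Or.inl h
        · exact Or.inr ⟨Or.inl rfl, hy.2⟩
        · exact Or.inr ⟨Or.inr h, hx⟩
      · rintro (h | ⟨(rfl | h), hx⟩)
        · exact Or.inl (Or.inl h)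
        · exact Or.inl (Or.inr rfl)
        · exact Or.inr ⟨h, hx⟩
    · rw [if_neg hy]
      constructor
      · rintro (h | ⟨h, hx⟩)
        · exact Or.inl h
        · exact Or.inr ⟨Or.inr h, hx⟩
      · rintro (h | ⟨(rfl | h), hx⟩)
        · exact Or.inl h
        · rcases Classical.em (x ∈ acc) with hm | hm
          · exact Or.inl hm
          · exact absurd ⟨hm, hx⟩ hy
        · exact Or.inr ⟨h, hx⟩

-- the A-side collecting fold: no duplicates
theorem pv_foldA_nodup (xs : List Int) (acc : List Int) (hacc : acc.Nodup) :
    (xs.foldl (fun a p => if p ∉ a ∧ 0 < p then a ++ [p] else a) acc).Nodup := by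
  induction xs generalizing acc with
  | nil => simpa
  | cons y ys ih =>
    simp only [List.foldl_cons]
    by_cases hy : y ∉ acc ∧ 0 < y
    · rw [if_pos hy]
      refine ih _ ?_
      simp only [List.nodup_append, List.nodup_singleton, hacc, true_and]
      intro a ha b hb
      rw [List.mem_singleton] at hb
      subst hb
      exact fun h => hy.1 (h ▸ ha)
    · rw [if_neg hy]; exact ih _ hacc

-- list.index of a member, as idxOf
theorem pv_index?_getD_of_mem (S : List Int) (p : Int) (hp : p ∈ S) :
    ((PySem.List.index? S p).getD 0 : Nat) = S.idxOf p := by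
  rw [PySem.List.index?_eq_idxOf?]
  have hs : (List.idxOf? p S).isSome := List.isSome_idxOf?.mpr hp
  rcases h : List.idxOf? p S with _ | k
  · rw [h] at hs; simp at hs
  · have h2 := List.idxOf_eq_getD_idxOf? p S
    rw [h] at h2
    simp [h2]

-- in a strictly increasing list, index + 1 = count of elements ≤ the element
theorem pv_count_rank (S : List Int) (p : Int) (hs : S.Pairwise (· < ·)) (hp : p ∈ S) :
    ((S.idxOf p : Int) + 1) = ((S.filter (fun q => decide (q ≤ p))).length : Int) := by
  induction S with
  | nil => simp at hp
  | cons x xs ih =>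
    rcases List.pairwise_cons.mp hs with ⟨hx, htl⟩
    by_cases hxp : p = x
    · subst hxp
      have hni : p ∉ xs := fun h => lt_irrefl p (hx p h)
      rw [List.idxOf_cons_self]
      have hnone : xs.filter (fun q => decide (q ≤ p)) = [] := by
        rw [List.filter_eq_nil_iff]
        intro q hq
        simp only [decide_eq_true_eq]
        exact not_le.mpr (hx q hq)
      simp [hnone]
    · have hmem : p ∈ xs := by
        rcases List.mem_cons.mp hp with h | h
        · exact absurd h hxp
        · exact h
      have hlt : x < p := hx p hmem
      rw [List.idxOf_cons_ne _ (Ne.symm hxp)]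
      rw [List.filter_cons, if_pos (by simp [le_of_lt hlt])]
      have := ih htl hmem
      simp only [List.length_cons]
      push_cast
      push_cast at this
      omega

-- two nodup lists with the same members have the same length
theorem pv_len_eq (S vals : List Int) (p : Int) (hnd : S.Nodup)
    (hmem : ∀ x, x ∈ S ↔ x ∈ vals ∧ 0 < x) :
    ((S.filter (fun q => decide (q ≤ p))).length : Int)
      = ((PySem.Set.ofList (vals.filter (fun q => decide (0 < q ∧ q ≤ p)))).length : Int) := by
  congr 1
  apply List.Perm.length_eq
  apply (List.perm_ext_iff_of_nodup (hnd.filter _) (PySem.Set.nodup_ofList _)).mpr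
  intro x
  simp only [List.mem_filter, PySem.Set.mem_ofList, decide_eq_true_eq, hmem x]
  tauto

-- ===== VERDICT (by name: the statement is the Claim_ definition above) =====
theorem adjust_placement_spec : Claim_equal_adjust_placement := by
  intro dict_round _ _
  unfold Spec_adjust_placement
  simp only [adjust_placement, adjust_placement_alt]
  apply List.map_congr_left
  intro kv hkv
  by_cases hp : 0 < PySem.List.pyGetD kv.2 0 0
  · rw [if_pos hp, if_pos hp]
    set p := PySem.List.pyGetD kv.2 0 0 with hpdef
    set L := dict_round.foldl (fun acc kv =>
        let p := PySem.List.pyGetD kv.2 0 0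
        if p ∉ acc ∧ 0 < p then acc ++ [p] else acc) [] with hL
    set S := PySem.List.sorted L (fun x => x) false with hS
    have hEq : L = (dict_round.map (fun kv => PySem.List.pyGetD kv.2 0 0)).foldl
        (fun a p => if p ∉ a ∧ 0 < p then a ++ [p] else a) [] := by
      rw [hL, List.foldl_map]
    have hmemL : ∀ x, x ∈ L ↔ x ∈ dict_round.map (fun kv => PySem.List.pyGetD kv.2 0 0) ∧ 0 < x := by
      intro x
      rw [hEq, pv_foldA_mem]
      simp
    have hmemS : ∀ x, x ∈ S ↔ x ∈ dict_round.map (fun kv => PySem.List.pyGetD kv.2 0 0) ∧ 0 < x := by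
      intro x
      rw [hS, PySem.List.mem_sorted]
      exact hmemL x
    have hndS : S.Nodup := by
      rw [hS, (PySem.List.sorted_perm _ _ _).nodup_iff, hEq]
      exact pv_foldA_nodup _ _ List.nodup_nil
    have hltS : S.Pairwise (· < ·) := by
      have h1 := PySem.List.sorted_pairwise L (fun x => x) (κ := Int)
      exact (h1.and hndS).imp (fun h => lt_of_le_of_ne h.1 h.2)
    have hpS : p ∈ S := (hmemS p).mpr ⟨List.mem_map_of_mem hkv, hp⟩
    congr 1
    rw [pv_index?_getD_of_mem S p hpS, pv_count_rank S p hltS hpS,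
        pv_len_eq S _ p hndS hmemS]
  · rw [if_neg hp, if_neg hp]
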